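-- pv_equiv track=rewrite | github.com/ThalesMMS/mammography-pipelines-py | src/mammography/tools/data_audit_registry.py | format_class_distribution
-- ===== SOURCE A (Python) =====
-- from typing import Iterable, Mapping
--
-- def format_class_distribution(histogram: Mapping[str, int]) -> str:
--     def sort_key(item: tuple[str, int]) -> tuple[int, int | str]:
--         key = item[0]
--         if key == "missing":
--             return (2, 0)
--         if key.isdigit():
--             return (0, int(key))
--         return (1, key)
--
--     ordered = sorted(histogram.items(), key=sort_key)
--     return ", ".join(f"{key}={value}" for key, value in ordered)
-- ===== SOURCE B (Python) =====
-- def format_class_distribution(histogram):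
--     digits, others, missing = [], [], []
--     for key, value in histogram.items():
--         if key == "missing":
--             missing.append((key, value))
--         elif key.isdigit():
--             digits.append((key, value))
--         else:
--             others.append((key, value))
--     digits.sort(key=lambda kv: int(kv[0]))
--     others.sort(key=lambda kv: kv[0])
--     return ", ".join(f"{k}={v}" for k, v in digits + others + missing)
-- ===== Notes on version B (the rewrite author's own statement) =====
-- stated objective: alternative
-- what changed: A sorts the whole item list once under a composite (category, int|str) key; B makes one partitioning pass into digit/other/missing buckets, sorts only the digit bucket by int value and the other-string bucket lexicographically, and concatenates digits + others + missing.
import Mathlib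
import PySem

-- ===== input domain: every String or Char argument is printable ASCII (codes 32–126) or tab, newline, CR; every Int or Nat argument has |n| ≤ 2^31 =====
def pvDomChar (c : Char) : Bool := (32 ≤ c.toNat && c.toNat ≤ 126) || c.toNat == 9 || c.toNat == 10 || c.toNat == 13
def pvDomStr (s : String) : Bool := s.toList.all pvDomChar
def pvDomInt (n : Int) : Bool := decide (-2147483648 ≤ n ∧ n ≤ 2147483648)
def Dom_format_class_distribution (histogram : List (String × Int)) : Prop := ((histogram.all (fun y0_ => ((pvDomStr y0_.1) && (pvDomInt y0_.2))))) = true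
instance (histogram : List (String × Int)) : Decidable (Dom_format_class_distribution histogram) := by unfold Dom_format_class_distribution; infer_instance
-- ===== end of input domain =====

-- B replaces A's single sort under a composite (category, value) key by a one-pass three-way
-- partition followed by two plain single-key sorts (digits by int value, other strings
-- lexicographically) concatenated with the 'missing' bucket last: objective 'alternative'.

-- ===== PORT A =====
-- A's sort_key returns (tag, int | str); the heterogeneous second component is encoded as the
-- lexicographic pair Int ×ₗ String — (int(key), "") for digit keys, (0, key) for other strings,
-- (0, "") for "missing". Python only compares second components between items of EQUAL tag,
-- and within one tag this encoding's order is exactly Python's int / str order.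
def fcdTag (item : String × Int) : Int :=
  if item.1 = "missing" then 2 else if PySem.Str.strIsdigit item.1 then 0 else 1

def fcdSub (item : String × Int) : Lex (Int × String) :=
  if item.1 = "missing" then toLex (0, "")
  else if PySem.Str.strIsdigit item.1 then
    -- int(key): key.isdigit() guarantees PySem.Int.ofStr? = some on the ASCII domain
    toLex ((PySem.Int.ofStr? item.1).getD 0, "")
  else toLex (0, item.1)

def format_class_distribution (histogram : List (String × Int)) : String :=
  let ordered := PySem.List.sorted2 histogram fcdTag fcdSub
  PySem.Str.join ", " (ordered.map (fun kv => kv.1 ++ "=" ++ PySem.Int.toStr kv.2))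

-- ===== PORT B =====
-- one pass of Source B's loop: partition into (digits, others, missing), in input order
def fcdStep (acc : List (String × Int) × List (String × Int) × List (String × Int))
    (kv : String × Int) : List (String × Int) × List (String × Int) × List (String × Int) :=
  if kv.1 = "missing" then (acc.1, acc.2.1, acc.2.2 ++ [kv])
  else if PySem.Str.strIsdigit kv.1 then (acc.1 ++ [kv], acc.2.1, acc.2.2)
  else (acc.1, acc.2.1 ++ [kv], acc.2.2)

def format_class_distribution_alt (histogram : List (String × Int)) : String :=
  let p := histogram.foldl fcdStep ([], [], [])
  let digits := PySem.List.sorted p.1 (fun kv => (PySem.Int.ofStr? kv.1).getD 0)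
  let others := PySem.List.sorted p.2.1 (fun kv => kv.1)
  PySem.Str.join ", " ((digits ++ others ++ p.2.2).map (fun kv => kv.1 ++ "=" ++ PySem.Int.toStr kv.2))

-- ===== PRECONDITION & SPEC =====
def Spec_format_class_distribution (histogram : List (String × Int)) (out : String) : Prop := out = format_class_distribution_alt histogram
instance (histogram : List (String × Int)) (out : String) : Decidable (Spec_format_class_distribution histogram out) := by unfold Spec_format_class_distribution; infer_instance

-- ===== CLAIM (what is proved, stated in full; the proofs are below) =====
def Claim_equal_format_class_distribution : Prop := ∀ (histogram : List (String × Int)), Dom_format_class_distribution histogram → Spec_format_class_distribution histogram (format_class_distribution histogram)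

-- ===== LEMMAS AND PROOFS =====

-- the three comparison predicates the two ports' insertion sorts use
def fcdLtA (a b : String × Int) : Bool :=
  decide (fcdTag a < fcdTag b) || (!decide (fcdTag b < fcdTag a) && decide (fcdSub a < fcdSub b))
def fcdLtD (a b : String × Int) : Bool :=
  decide ((PySem.Int.ofStr? a.1).getD 0 < (PySem.Int.ofStr? b.1).getD 0)
def fcdLtO (a b : String × Int) : Bool := decide (a.1 < b.1)

lemma fcd_sorted2_eq (xs : List (String × Int)) :
    PySem.List.sorted2 xs fcdTag fcdSub =
      xs.foldl (fun acc x => PySem.List.insertBy fcdLtA x acc) [] := rfl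

lemma insertBy_append_not {α : Type} (before : α → α → Bool) (x : α) (ys zs : List α)
    (h : ∀ y ∈ ys, before x y = false) :
    PySem.List.insertBy before x (ys ++ zs) = ys ++ PySem.List.insertBy before x zs := by
  induction ys with
  | nil => simp
  | cons y ys ih =>
      simp only [List.cons_append, PySem.List.insertBy, h y (by simp)]
      simp [ih (fun y hy => h y (by simp [hy]))]

lemma insertBy_append_all {α : Type} (before : α → α → Bool) (x : α) (ys zs : List α)
    (h : ∀ z ∈ zs, before x z = true) :
    PySem.List.insertBy before x (ys ++ zs) = PySem.List.insertBy before x ys ++ zs := by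
  induction ys with
  | nil =>
      cases zs with
      | nil => simp
      | cons z zs => simp [PySem.List.insertBy, h z (by simp)]
  | cons y ys ih =>
      by_cases hb : before x y = true
      · simp [PySem.List.insertBy, hb]
      · simp only [Bool.not_eq_true] at hb
        simp [PySem.List.insertBy, hb, ih]

lemma insertBy_congr {α : Type} (before before' : α → α → Bool) (x : α) (ys : List α)
    (h : ∀ y ∈ ys, before x y = before' x y) :
    PySem.List.insertBy before x ys = PySem.List.insertBy before' x ys := by
  induction ys with
  | nil => rfl
  | cons y ys ih =>
      simp only [PySem.List.insertBy, h y (by simp)]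
      rw [ih (fun y hy => h y (by simp [hy]))]

lemma fcdTag_cases (a : String × Int) : fcdTag a = 0 ∨ fcdTag a = 1 ∨ fcdTag a = 2 := by
  unfold fcdTag; split_ifs <;> simp

lemma fcdLtA_of_tag_lt {a b : String × Int} (h : fcdTag a < fcdTag b) : fcdLtA a b = true := by
  simp [fcdLtA, h]

lemma fcdLtA_of_tag_gt {a b : String × Int} (h : fcdTag b < fcdTag a) : fcdLtA a b = false := by
  simp [fcdLtA, h, not_lt_of_gt h]

lemma fcdSub_of_tag_zero {a : String × Int} (h : fcdTag a = 0) :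
    fcdSub a = toLex ((PySem.Int.ofStr? a.1).getD 0, "") := by
  unfold fcdTag at h; unfold fcdSub
  split_ifs at h ⊢ <;> simp_all

lemma fcdSub_of_tag_one {a : String × Int} (h : fcdTag a = 1) : fcdSub a = toLex (0, a.1) := by
  unfold fcdTag at h; unfold fcdSub
  split_ifs at h ⊢ <;> simp_all

lemma fcdSub_of_tag_two {a : String × Int} (h : fcdTag a = 2) : fcdSub a = toLex (0, "") := by
  unfold fcdTag at h; unfold fcdSub
  split_ifs at h ⊢ <;> simp_all

lemma fcdLtA_of_tags_zero {a b : String × Int} (ha : fcdTag a = 0) (hb : fcdTag b = 0) :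
    fcdLtA a b = fcdLtD a b := by
  simp [fcdLtA, fcdLtD, ha, hb, fcdSub_of_tag_zero ha, fcdSub_of_tag_zero hb,
    Prod.Lex.toLex_lt_toLex]

lemma fcdLtA_of_tags_one {a b : String × Int} (ha : fcdTag a = 1) (hb : fcdTag b = 1) :
    fcdLtA a b = fcdLtO a b := by
  simp [fcdLtA, fcdLtO, ha, hb, fcdSub_of_tag_one ha, fcdSub_of_tag_one hb,
    Prod.Lex.toLex_lt_toLex]

lemma fcdLtA_of_tags_two {a b : String × Int} (ha : fcdTag a = 2) (hb : fcdTag b = 2) :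
    fcdLtA a b = false := by
  simp [fcdLtA, ha, hb, fcdSub_of_tag_two ha, fcdSub_of_tag_two hb]

-- the loop invariant: inserting with the composite key into D ++ O ++ M keeps the three
-- buckets separate and sorts each bucket by its own key
lemma fcd_main (xs : List (String × Int)) :
    ∀ (D O M : List (String × Int)),
      (∀ y ∈ D, fcdTag y = 0) → (∀ y ∈ O, fcdTag y = 1) → (∀ y ∈ M, fcdTag y = 2) →
      xs.foldl (fun acc x => PySem.List.insertBy fcdLtA x acc) (D ++ O ++ M) =
        (xs.filter (fun y => fcdTag y == 0)).foldl
            (fun acc x => PySem.List.insertBy fcdLtD x acc) D ++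
        (xs.filter (fun y => fcdTag y == 1)).foldl
            (fun acc x => PySem.List.insertBy fcdLtO x acc) O ++
        (M ++ xs.filter (fun y => fcdTag y == 2)) := by
  induction xs with
  | nil => intro D O M _ _ _; simp
  | cons x xs ih =>
      intro D O M hD hO hM
      rcases fcdTag_cases x with htag | htag | htag
      · have hstep : PySem.List.insertBy fcdLtA x (D ++ O ++ M) =
            PySem.List.insertBy fcdLtD x D ++ O ++ M := by
          rw [List.append_assoc, insertBy_append_all _ _ _ _ ?_,
            insertBy_congr fcdLtA fcdLtD x D (fun y hy => fcdLtA_of_tags_zero htag (hD y hy)),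
            List.append_assoc]
          intro z hz
          rcases List.mem_append.mp hz with hz | hz
          · exact fcdLtA_of_tag_lt (by rw [htag, hO z hz]; norm_num)
          · exact fcdLtA_of_tag_lt (by rw [htag, hM z hz]; norm_num)
        simp only [List.foldl_cons, hstep, List.filter_cons, htag]
        norm_num
        simpa [List.append_assoc] using ih _ O M
          (fun y hy => ((PySem.List.insertBy_mem_iff _ _ _ _).mp hy).elim
            (fun h => h ▸ htag) (hD y)) hO hM
      · have hstep : PySem.List.insertBy fcdLtA x (D ++ O ++ M) =
            D ++ (PySem.List.insertBy fcdLtO x O ++ M) := by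
          rw [List.append_assoc,
            insertBy_append_not _ _ _ _
              (fun y hy => fcdLtA_of_tag_gt (by rw [htag, hD y hy]; norm_num)),
            insertBy_append_all _ _ _ _
              (fun z hz => fcdLtA_of_tag_lt (by rw [htag, hM z hz]; norm_num)),
            insertBy_congr fcdLtA fcdLtO x O (fun y hy => fcdLtA_of_tags_one htag (hO y hy))]
        simp only [List.foldl_cons, hstep, List.filter_cons, htag]
        norm_num
        simpa [List.append_assoc] using ih D _ M hD
          (fun y hy => ((PySem.List.insertBy_mem_iff _ _ _ _).mp hy).elim
            (fun h => h ▸ htag) (hO y)) hM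
      · have hstep : PySem.List.insertBy fcdLtA x (D ++ O ++ M) =
            D ++ O ++ (M ++ [x]) := by
          rw [PySem.List.insertBy_of_forall_not_before _ _ _ ?_]
          · simp [List.append_assoc]
          intro y hy
          rcases List.mem_append.mp hy with hy' | hy'
          · rcases List.mem_append.mp hy' with hy'' | hy''
            · exact fcdLtA_of_tag_gt (by rw [htag, hD y hy'']; norm_num)
            · exact fcdLtA_of_tag_gt (by rw [htag, hO y hy'']; norm_num)
          · exact fcdLtA_of_tags_two htag (hM y hy')
        simp only [List.foldl_cons, hstep, List.filter_cons, htag]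
        norm_num
        simpa [List.append_assoc] using ih D O _ hD hO
          (fun y hy => (List.mem_append.mp hy).elim (hM y)
            (fun h => (List.mem_singleton.mp h) ▸ htag))

-- Source B's partitioning loop produces exactly the three tag filters
lemma fcd_partition (xs : List (String × Int)) :
    ∀ (a b c : List (String × Int)),
      xs.foldl fcdStep (a, b, c) =
        (a ++ xs.filter (fun y => fcdTag y == 0),
         b ++ xs.filter (fun y => fcdTag y == 1),
         c ++ xs.filter (fun y => fcdTag y == 2)) := by
  induction xs with
  | nil => intro a b c; simp
  | cons x xs ih =>
      intro a b c
      by_cases hm : x.1 = "missing"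
      · have h2 : fcdTag x = 2 := by simp [fcdTag, hm]
        simp only [List.foldl_cons, fcdStep, if_pos hm, List.filter_cons, h2, ih]
        norm_num
      · by_cases hd : PySem.Str.strIsdigit x.1 = true
        · have h0 : fcdTag x = 0 := by simp only [fcdTag, if_neg hm, if_pos hd]
          simp only [List.foldl_cons, fcdStep, if_neg hm, if_pos hd, List.filter_cons, h0, ih]
          norm_num
        · have h1 : fcdTag x = 1 := by simp only [fcdTag, if_neg hm, if_neg hd]
          simp only [List.foldl_cons, fcdStep, if_neg hm, if_neg hd, List.filter_cons, h1, ih]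
          norm_num

-- ===== VERDICT (by name: the statement is the Claim_ definition above) =====
theorem format_class_distribution_spec : Claim_equal_format_class_distribution := by
  intro histogram _
  unfold Spec_format_class_distribution
  unfold format_class_distribution format_class_distribution_alt
  simp only [fcd_sorted2_eq, fcd_partition histogram [] [] [], List.nil_append,
    PySem.List.sorted_eq_foldl_insertBy]
  have := fcd_main histogram [] [] [] (by simp) (by simp) (by simp)
  simp only [List.append_nil, List.nil_append] at this
  rw [this]
  rfl
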